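-- pv_equiv track=rewrite | github.com/gubenkoved/leetcode | problem-2528-maximize-the-minimum-powered-city.py | is_possible_to_reach
-- ===== SOURCE A (Python) =====
-- from typing import List
--
-- def is_possible_to_reach(power: List[int], r: int, k: int, target_power: int) -> bool:
--     # when we will place a station or multiple stations we need to remember when it goes
--     # out of range, this diff will maintain the adjustment needed at a given index;
--     # when we have power deficiency at some index i, we will place required number
--     # of stations at index i + r, to maximize the benefit for other indexes
--     n = len(power)
--     diff = [0] * n
--     delta_in_range = 0
--
--     for idx in range(n):
--         # handle out of range
--         delta_in_range += diff[idx]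
--
--         effective_power = power[idx] + delta_in_range
--         deficiency = target_power - effective_power
--         if deficiency > 0:
--             # need to place stations here
--             if k < deficiency:
--                 return False
--
--             delta_in_range += deficiency
--             k -= deficiency
--
--             # remember when it goes out of range
--             if idx + 2 * r + 1 < n:
--                 diff[idx + 2 * r + 1] -= deficiency
--
--     return True
-- ===== SOURCE B (Python) =====
-- from typing import List
--
-- def is_possible_to_reach(power: List[int], r: int, k: int, target_power: int) -> bool:
--     # Staged computation: first build the prefix-sum array of the required
--     # placement amounts (the deficiency at each index given the sliding window
--     # of earlier placements, read off the prefix sums themselves); the budget k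
--     # is not touched in the loop and there is no early exit -- the grand total
--     # is compared against the (clamped) budget once at the end.
--     pref = [0]
--     for idx, p in enumerate(power):
--         lo = idx - 2 * r
--         window = pref[idx] - pref[lo if lo > 0 else 0]
--         need = target_power - p - window
--         pref.append(pref[idx] + (need if need > 0 else 0))
--     return pref[len(power)] <= (k if k > 0 else 0)
-- ===== Notes on version B (the rewrite author's own statement) =====
-- stated objective: alternative
-- what changed: Replaces A's single-pass greedy (difference array, running budget k, early return False) by a staged computation: a loop that only builds the prefix-sum array of required placement amounts, reading the active window off the prefix sums themselves, followed by one final comparison of the grand total against the clamped budget; k is never tracked and there is no early exit.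
-- outside the precondition, e.g. on is_possible_to_reach([1, 1, 0, 2], -1, 5, 5): A returns False, B raises IndexError
import Mathlib
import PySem

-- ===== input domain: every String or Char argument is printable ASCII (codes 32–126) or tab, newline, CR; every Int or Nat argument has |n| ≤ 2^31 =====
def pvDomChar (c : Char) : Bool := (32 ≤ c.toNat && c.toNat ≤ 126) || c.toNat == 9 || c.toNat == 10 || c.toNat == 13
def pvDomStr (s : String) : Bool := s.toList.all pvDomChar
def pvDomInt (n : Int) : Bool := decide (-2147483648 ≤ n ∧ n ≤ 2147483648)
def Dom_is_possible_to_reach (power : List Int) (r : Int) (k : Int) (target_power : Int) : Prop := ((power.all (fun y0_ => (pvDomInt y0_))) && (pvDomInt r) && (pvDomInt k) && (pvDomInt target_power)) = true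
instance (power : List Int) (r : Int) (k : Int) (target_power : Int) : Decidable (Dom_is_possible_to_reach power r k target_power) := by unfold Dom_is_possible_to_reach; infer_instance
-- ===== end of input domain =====

-- B replaces A's single-pass greedy (difference array, running budget, early return) by a staged
-- computation: build the prefix sums of the required placement amounts, then compare the grand
-- total against the clamped budget once at the end (alternative decomposition, same O(n) cost).

-- ===== PORT A =====
-- the for-loop over range(n) with state (diff, delta_in_range, k) and early `return False`
def pvGoA (power : List Int) (r target_power : Int) (idx : Nat) (diff : List Int)
    (delta : Int) (k : Int) : Bool :=
  if h : idx < power.length then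
    let delta1 := delta + PySem.List.pyGetD diff (idx : Int) 0
    let deficiency := target_power - (PySem.List.pyGetD power (idx : Int) 0 + delta1)
    if deficiency > 0 then
      if k < deficiency then
        false
      else
        let t : Int := (idx : Int) + 2 * r + 1
        let diff1 := if t < (power.length : Int)
          then PySem.List.pySetD diff t (PySem.List.pyGetD diff t 0 - deficiency)
          else diff
        pvGoA power r target_power (idx + 1) diff1 (delta1 + deficiency) (k - deficiency)
    else
      pvGoA power r target_power (idx + 1) diff delta1 k
  else
    true
termination_by power.length - idx

def is_possible_to_reach (power : List Int) (r : Int) (k : Int) (target_power : Int) : Bool :=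
  pvGoA power r target_power 0 (List.replicate power.length 0) 0 k

-- ===== PORT B =====
-- Source B's loop body: `need = target_power - p - window` with the window read off the prefix sums
def pvNeed (r target_power p : Int) (idx : Nat) (pref : List Int) : Int :=
  let lo : Int := (idx : Int) - 2 * r
  let window : Int := PySem.List.pyGetD pref (idx : Int) 0
    - PySem.List.pyGetD pref (if lo > 0 then lo else 0) 0
  target_power - p - window

-- Source B's `for idx, p in enumerate(power)` loop: builds the prefix-sum list of the needs
def pvGoB (r target_power : Int) : List Int → Nat → List Int → List Int
  | [], _idx, pref => pref
  | p :: rest, idx, pref =>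
    let need : Int := pvNeed r target_power p idx pref
    pvGoB r target_power rest (idx + 1)
      (pref ++ [PySem.List.pyGetD pref (idx : Int) 0 + (if need > 0 then need else 0)])

def is_possible_to_reach_alt (power : List Int) (r : Int) (k : Int) (target_power : Int) : Bool :=
  let pref := pvGoB r target_power power 0 [0]
  decide (PySem.List.pyGetD pref (power.length : Int) 0 ≤ (if k > 0 then k else 0))

-- ===== PRECONDITION & SPEC =====
-- Pre_ excludes negative radius r (outside the problem's natural domain): there A's
-- `diff[idx + 2*r + 1]` hits a negative Python index that either raises IndexError or silently
-- wraps to the end of the array — an artefact of A's difference-array encoding — while B's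
-- prefix read `pref[lo]` raises IndexError.
def Pre_is_possible_to_reach (power : List Int) (r : Int) (k : Int) (target_power : Int) : Prop :=
  0 ≤ r
instance (power : List Int) (r : Int) (k : Int) (target_power : Int) : Decidable (Pre_is_possible_to_reach power r k target_power) := by unfold Pre_is_possible_to_reach; infer_instance

def pvWitness_is_possible_to_reach : List Int × Int × Int × Int := ([1, 2, 0, 3], 1, 3, 2)

def Spec_is_possible_to_reach (power : List Int) (r : Int) (k : Int) (target_power : Int) (out : Bool) : Prop := out = is_possible_to_reach_alt power r k target_power
instance (power : List Int) (r : Int) (k : Int) (target_power : Int) (out : Bool) : Decidable (Spec_is_possible_to_reach power r k target_power out) := by unfold Spec_is_possible_to_reach; infer_instance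

-- ===== CLAIM (what is proved, stated in full; the proofs are below) =====
def Claim_equal_is_possible_to_reach : Prop := ∀ (power : List Int) (r : Int) (k : Int) (target_power : Int), Dom_is_possible_to_reach power r k target_power → Pre_is_possible_to_reach power r k target_power → Spec_is_possible_to_reach power r k target_power (is_possible_to_reach power r k target_power)

-- ===== LEMMAS AND PROOFS =====

theorem pvGoB_getD_ge (r tp : Int) :
    ∀ (rest : List Int) (idx : Nat) (pref : List Int), pref.length = idx + 1 →
    pref.getD idx 0 ≤ (pvGoB r tp rest idx pref).getD (idx + rest.length) 0 := by
  intro rest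
  induction rest with
  | nil => intro idx pref _; simp [pvGoB]
  | cons p rest' ih =>
    intro idx pref hlen
    simp only [pvGoB]
    set need := pvNeed r tp p idx pref with hneed
    set v : Int := PySem.List.pyGetD pref (idx : Int) 0 + (if need > 0 then need else 0) with hv
    have hpg : PySem.List.pyGetD pref (idx : Int) 0 = pref.getD idx 0 :=
      PySem.List.pyGetD_natCast pref idx 0
    have hvge : pref.getD idx 0 ≤ v := by
      rw [hv, hpg]; split <;> omega
    have hget : (pref ++ [v]).getD (idx + 1) 0 = v := by
      have h1 : (pref ++ [v])[pref.length]? = some v := List.getElem?_concat_length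
      rw [hlen] at h1
      simp [List.getD, h1]
    have key := ih (idx + 1) (pref ++ [v]) (by simp [hlen])
    rw [hget] at key
    calc pref.getD idx 0 ≤ v := hvge
      _ ≤ _ := by simpa [Nat.add_comm, Nat.add_assoc, Nat.add_left_comm] using key

-- getD at the freshly appended last position / at an old position
theorem pvGetD_concat_self (xs : List Int) (v : Int) : (xs ++ [v]).getD xs.length 0 = v := by
  have h1 : (xs ++ [v])[xs.length]? = some v := List.getElem?_concat_length
  simp [List.getD, h1]

theorem pvGetD_concat_lt (xs : List Int) (v : Int) (i : Nat) (h : i < xs.length) :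
    (xs ++ [v]).getD i 0 = xs.getD i 0 := by
  simp [List.getD, List.getElem?_append_left h]

-- pyGetD at a nonnegative Int index is getD at its toNat
theorem pvPyGetD_nonneg (xs : List Int) (i : Int) (h : 0 ≤ i) :
    PySem.List.pyGetD xs i 0 = xs.getD i.toNat 0 := by
  obtain ⟨n, rfl⟩ : ∃ n : Nat, i = (n : Int) := ⟨i.toNat, by omega⟩
  simp

-- main simulation lemma
theorem pvSim (power : List Int) (r tp k : Int) (hr : 0 ≤ r) :
    ∀ (rest : List Int) (idx : Nat) (diff : List Int) (delta kA : Int) (pref : List Int),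
    power.drop idx = rest →
    idx ≤ power.length →
    diff.length = power.length →
    pref.length = idx + 1 →
    kA = k - pref.getD idx 0 →
    delta = pref.getD idx 0 - pref.getD ((idx : Int) - 1 - 2 * r).toNat 0 →
    0 ≤ pref.getD idx 0 →
    (pref.getD idx 0 ≤ k ∨ pref.getD idx 0 = 0) →
    (∀ j : Nat, idx ≤ j → j < power.length →
      diff.getD j 0 = if 0 ≤ (j : Int) - 2 * r - 1 ∧ (j : Int) - 2 * r - 1 < (idx : Int)
        then pref.getD ((j : Int) - 2 * r - 1).toNat 0 - pref.getD ((j : Int) - 2 * r).toNat 0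
        else 0) →
    pvGoA power r tp idx diff delta kA
      = decide (PySem.List.pyGetD (pvGoB r tp rest idx pref) (power.length : Int) 0
          ≤ (if k > 0 then k else 0)) := by
  intro rest
  induction rest with
  | nil =>
    intro idx diff delta kA pref hdrop hle hdl hpl hk hdelta hnn hok _
    have hidx : idx = power.length := by
      have := List.drop_eq_nil_iff.mp hdrop
      omega
    rw [pvGoA, dif_neg (by omega)]
    simp only [pvGoB]
    rw [eq_comm, decide_eq_true_iff, PySem.List.pyGetD_natCast, ← hidx]
    split <;> omega
  | cons p rest' ih =>
    intro idx diff delta kA pref hdrop hle hdl hpl hk hdelta hnn hok hdiff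
    have hlt : idx < power.length := by
      by_contra h
      rw [List.drop_eq_nil_iff.mpr (by omega)] at hdrop
      simp at hdrop
    have hget : power[idx]'hlt = p := by
      have : (power.drop idx)[0]'(by simp [hdrop]) = p := by simp [hdrop]
      simpa [List.getElem_drop] using this
    have hdrop' : power.drop (idx + 1) = rest' := by
      have : List.drop 1 (power.drop idx) = rest' := by rw [hdrop]; rfl
      rw [List.drop_drop] at this
      simpa [Nat.add_comm] using this
    have hn : power.length = idx + 1 + rest'.length := by
      have h1 := congrArg List.length hdrop
      simp at h1
      omega
    -- shared abbreviations
    set a0 := pref.getD idx 0 with ha0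
    set lo : Int := (idx : Int) - 2 * r with hlo
    set aL := pref.getD lo.toNat 0 with haL
    have hLlt : lo.toNat < pref.length := by rw [hpl]; omega
    -- A's index reads
    have hdidx : PySem.List.pyGetD diff ((idx : Nat) : Int) 0
        = (if 0 ≤ (idx : Int) - 2 * r - 1 ∧ (idx : Int) - 2 * r - 1 < (idx : Int)
          then pref.getD ((idx : Int) - 2 * r - 1).toNat 0 - pref.getD ((idx : Int) - 2 * r).toNat 0
          else 0) := by
      rw [PySem.List.pyGetD_natCast]
      exact hdiff idx (le_refl _) hlt
    have hpidx : PySem.List.pyGetD power ((idx : Nat) : Int) 0 = p := by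
      rw [PySem.List.pyGetD_natCast]
      simp [List.getD, hget.symm, hlt, List.getElem?_eq_getElem]
    -- delta after A's diff read = B's window
    have hdelta1 : delta + PySem.List.pyGetD diff ((idx : Nat) : Int) 0 = a0 - aL := by
      rw [hdidx, hdelta]
      by_cases hc : 0 ≤ (idx : Int) - 2 * r - 1
      · rw [if_pos ⟨hc, by omega⟩]
        have e1 : ((idx : Int) - 1 - 2 * r).toNat = ((idx : Int) - 2 * r - 1).toNat := by omega
        have e2 : ((idx : Int) - 2 * r).toNat = lo.toNat := by omega
        rw [e1, e2]
        ring
      · rw [if_neg (by omega)]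
        have e1 : ((idx : Int) - 1 - 2 * r).toNat = lo.toNat := by omega
        rw [e1]
        ring
    -- B's need = A's deficiency
    have hneed : pvNeed r tp p idx pref = tp - (p + (a0 - aL)) := by
      have e1 : (if (idx : Int) - 2 * r > 0 then (idx : Int) - 2 * r else 0)
          = ((lo.toNat : Nat) : Int) := by
        rw [hlo]; split <;> omega
      simp only [pvNeed, e1, PySem.List.pyGetD_natCast]
      rw [ha0, haL]
      ring
    set need := tp - (p + (a0 - aL)) with hneedv
    -- unfold one step of both loops
    rw [pvGoA, dif_pos hlt]
    simp only [pvGoB, hneed, hpidx]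
    rw [hdelta1]
    set v : Int := PySem.List.pyGetD pref ((idx : Nat) : Int) 0 + (if need > 0 then need else 0)
      with hv
    have hva : v = a0 + (if need > 0 then need else 0) := by
      rw [hv, PySem.List.pyGetD_natCast, ha0]
    set pref' : List Int := pref ++ [v] with hpref'
    have hpl' : pref'.length = idx + 1 + 1 := by simp [hpref', hpl]
    have hlast' : pref'.getD (idx + 1) 0 = v := by
      have := pvGetD_concat_self pref v
      rw [hpl] at this
      exact this
    have hold' : ∀ i : Nat, i < idx + 1 → pref'.getD i 0 = pref.getD i 0 := by
      intro i hi
      exact pvGetD_concat_lt pref v i (by omega)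
    -- the new delta invariant index
    have hdelta'idx : (((idx + 1 : Nat) : Int) - 1 - 2 * r).toNat = lo.toNat := by omega
    by_cases hpos : need > 0
    · rw [if_pos hpos]
      by_cases hkk : kA < need
      · rw [if_pos hkk]
        -- A fails; show B's final total exceeds the clamped budget
        have hvv : v = a0 + need := by rw [hva, if_pos hpos]
        have hmono := pvGoB_getD_ge r tp rest' (idx + 1) pref' (by omega)
        rw [hlast'] at hmono
        rw [eq_comm, decide_eq_false_iff_not]
        intro hcon
        rw [pvPyGetD_nonneg _ (power.length : Int) (by positivity)] at hcon
        have e2 : ((power.length : Int)).toNat = idx + 1 + rest'.length := by omega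
        rw [e2] at hcon
        have : a0 + need ≤ (pvGoB r tp rest' (idx + 1) pref').getD (idx + 1 + rest'.length) 0 := by
          rw [← hvv]; exact hmono
        revert hcon this
        split <;> omega
      · rw [if_neg hkk]
        set t : Int := (idx : Int) + 2 * r + 1 with ht
        have hvv : v = a0 + need := by rw [hva, if_pos hpos]
        -- establish the diff invariant for the updated diff array
        have hdiff' : ∀ j : Nat, idx + 1 ≤ j → j < power.length →
            (if t < (power.length : Int)
              then PySem.List.pySetD diff t (PySem.List.pyGetD diff t 0 - need)
              else diff).getD j 0
            = if 0 ≤ (j : Int) - 2 * r - 1 ∧ (j : Int) - 2 * r - 1 < ((idx + 1 : Nat) : Int)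
              then pref'.getD ((j : Int) - 2 * r - 1).toNat 0 - pref'.getD ((j : Int) - 2 * r).toNat 0
              else 0 := by
          intro j hj1 hj2
          by_cases hjt : (j : Int) = t
          · -- the newly scheduled expiry
            have htn : t < (power.length : Int) := by omega
            rw [if_pos htn, PySem.List.pySetD_of_nonneg _ _ (by omega)]
            have htj : t.toNat = j := by omega
            have hjlen : j < diff.length := by omega
            have hset : (diff.set t.toNat (PySem.List.pyGetD diff t 0 - need)).getD j 0
                = PySem.List.pyGetD diff t 0 - need := by
              rw [htj]
              simp [List.getD, List.getElem?_set_self, hjlen]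
            rw [hset, pvPyGetD_nonneg diff t (by omega)]
            have hold0 : diff.getD t.toNat 0 = 0 := by
              have := hdiff t.toNat (by omega) (by omega)
              rw [this, if_neg (by omega)]
            rw [hold0]
            have hc : 0 ≤ (j : Int) - 2 * r - 1 ∧ (j : Int) - 2 * r - 1 < ((idx + 1 : Nat) : Int) := by
              constructor <;> omega
            rw [if_pos hc]
            have e1 : ((j : Int) - 2 * r - 1).toNat = idx := by omega
            have e2 : ((j : Int) - 2 * r).toNat = idx + 1 := by omega
            rw [e1, e2, hlast', hold' idx (by omega), ← ha0, hvv]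
            ring
          · -- an untouched entry
            have hunch :
                (if t < (power.length : Int)
                  then PySem.List.pySetD diff t (PySem.List.pyGetD diff t 0 - need)
                  else diff).getD j 0 = diff.getD j 0 := by
              split
              · rw [PySem.List.pySetD_of_nonneg _ _ (by omega)]
                have hne : t.toNat ≠ j := by omega
                simp [List.getD, List.getElem?_set_ne hne]
              · rfl
            rw [hunch, hdiff j (by omega) hj2]
            have hne2 : (j : Int) - 2 * r - 1 ≠ (idx : Int) := by omega
            by_cases hc : 0 ≤ (j : Int) - 2 * r - 1 ∧ (j : Int) - 2 * r - 1 < (idx : Int)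
            · rw [if_pos hc, if_pos ⟨hc.1, by push_cast; omega⟩]
              rw [hold' ((j : Int) - 2 * r - 1).toNat (by omega),
                hold' ((j : Int) - 2 * r).toNat (by omega)]
            · rw [if_neg hc, if_neg (by push_cast at hc ⊢; omega)]
        have key := ih (idx + 1)
          (if t < (power.length : Int)
            then PySem.List.pySetD diff t (PySem.List.pyGetD diff t 0 - need)
            else diff)
          (a0 - aL + need) (kA - need) pref'
          hdrop' (by omega)
          (by split
              · rw [PySem.List.length_pySetD]; exact hdl
              · exact hdl)
          (by omega)
          (by rw [hlast', hvv, hk]; ring)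
          (by rw [hlast', hdelta'idx, hold' lo.toNat (by omega), ← haL, hvv]; ring)
          (by rw [hlast']; omega)
          (by rw [hlast', hvv]; omega)
          hdiff'
        exact key
    · rw [if_neg hpos]
      have hvv : v = a0 := by rw [hva, if_neg hpos]; ring
      have hdiff' : ∀ j : Nat, idx + 1 ≤ j → j < power.length →
          diff.getD j 0
          = if 0 ≤ (j : Int) - 2 * r - 1 ∧ (j : Int) - 2 * r - 1 < ((idx + 1 : Nat) : Int)
            then pref'.getD ((j : Int) - 2 * r - 1).toNat 0 - pref'.getD ((j : Int) - 2 * r).toNat 0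
            else 0 := by
        intro j hj1 hj2
        rw [hdiff j (by omega) hj2]
        by_cases hc : 0 ≤ (j : Int) - 2 * r - 1 ∧ (j : Int) - 2 * r - 1 < (idx : Int)
        · rw [if_pos hc, if_pos ⟨hc.1, by push_cast; omega⟩]
          rw [hold' ((j : Int) - 2 * r - 1).toNat (by omega),
            hold' ((j : Int) - 2 * r).toNat (by omega)]
        · by_cases hc2 : 0 ≤ (j : Int) - 2 * r - 1 ∧ (j : Int) - 2 * r - 1 < ((idx + 1 : Nat) : Int)
          · -- only the boundary case (j : Int) - 2r - 1 = idx is new; both prefix entries are v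
            have he : (j : Int) - 2 * r - 1 = (idx : Int) := by push_cast at hc2 hc ⊢; omega
            rw [if_neg hc, if_pos hc2]
            have e1 : ((j : Int) - 2 * r - 1).toNat = idx := by omega
            have e2 : ((j : Int) - 2 * r).toNat = idx + 1 := by omega
            rw [e1, e2, hlast', hold' idx (by omega), ← ha0, hvv]
            ring
          · rw [if_neg hc, if_neg hc2]
      have key := ih (idx + 1) diff (a0 - aL) kA pref'
        hdrop' (by omega) hdl (by omega)
        (by rw [hlast', hvv]; exact hk)
        (by rw [hlast', hdelta'idx, hold' lo.toNat (by omega), ← haL, hvv])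
        (by rw [hlast', hvv]; exact hnn)
        (by rw [hlast', hvv]; exact hok)
        hdiff'
      exact key

-- ===== VERDICT (by name: the statement is the Claim_ definition above) =====
theorem is_possible_to_reach_spec : Claim_equal_is_possible_to_reach := by
  intro power r k target_power _ hpre
  unfold Spec_is_possible_to_reach is_possible_to_reach is_possible_to_reach_alt
  have := pvSim power r target_power k hpre power 0 (List.replicate power.length 0) 0 k [0]
    (by simp) (by simp) (by simp) (by simp) (by simp) (by simp) (by simp) (by simp)
    (by intro j _ _; simp)
  simpa using this
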